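-- pv_equiv track=rewrite | github.com/KingBaruh/ZeroToHeroPython | Level0/tig1.py | max_sum_row_index
-- ===== SOURCE A (Python) =====
-- def max_sum_row_index(A, x):
--
--     max_overall = float('-inf')
--     best_row_index = -1
--
--     for row_index, row in enumerate(A):
--         current_sum = 0
--
--         for i in range(x):
--             current_sum += row[i]
--         max_in_row = current_sum
--
--         for i in range(x, len(row)):
--             current_sum = current_sum + row[i] - row[i - x]
--             max_in_row = max(max_in_row, current_sum)
--
--         if max_in_row > max_overall:
--             max_overall = max_in_row
--             best_row_index = row_index
--
--     return best_row_index
-- ===== SOURCE B (Python) =====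
-- def max_sum_row_index(A, x):
--     def best_window_sum(row):
--         P = [0]
--         for v in row:
--             P.append(P[-1] + v)
--         return max(P[i + x] - P[i] for i in range(len(row) - x + 1))
--     bests = [best_window_sum(row) for row in A]
--     if not bests:
--         return -1
--     return bests.index(max(bests))
-- ===== Notes on version B (the rewrite author's own statement) =====
-- stated objective: alternative
-- what changed: Replaces A's running incremental window sum and running-best bookkeeping by a prefix-sum table per row (best window = max of P[i+x]-P[i]) and a final bests.index(max(bests)) argmax pass.
import Mathlib
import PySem

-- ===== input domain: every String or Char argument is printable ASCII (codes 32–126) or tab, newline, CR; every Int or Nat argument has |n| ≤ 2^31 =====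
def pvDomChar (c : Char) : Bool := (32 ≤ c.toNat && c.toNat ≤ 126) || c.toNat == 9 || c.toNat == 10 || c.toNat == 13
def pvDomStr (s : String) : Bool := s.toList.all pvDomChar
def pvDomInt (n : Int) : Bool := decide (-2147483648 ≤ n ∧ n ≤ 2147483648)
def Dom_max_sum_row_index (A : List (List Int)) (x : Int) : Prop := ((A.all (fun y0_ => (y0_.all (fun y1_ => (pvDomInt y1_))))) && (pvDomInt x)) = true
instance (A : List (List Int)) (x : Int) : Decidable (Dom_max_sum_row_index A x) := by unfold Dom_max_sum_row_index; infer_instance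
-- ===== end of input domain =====

-- B replaces A's incremental sliding-window sum and running-best bookkeeping by a per-row
-- prefix-sum table plus a final index-of-max pass over the list of per-row bests (alternative
-- decomposition, same asymptotic cost).


-- ===== PORT A =====
-- per-row body of A: initial sum over range(x), then the incremental loop over range(x, len(row))
def pvArow (row : List Int) (x : Int) : Int :=
  let s0 := (PySem.List.pyRange 0 x 1).foldl (fun c i => c + PySem.List.pyGetD row i 0) 0
  let p := (PySem.List.pyRange x (row.length : Int) 1).foldl
      (fun (st : Int × Int) i =>
        let c := st.2 + PySem.List.pyGetD row i 0 - PySem.List.pyGetD row (i - x) 0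
        (max st.1 c, c)) (s0, s0)
  p.1

-- float('-inf') is modelled as `none` (any Int compares strictly greater than it)
def max_sum_row_index (A : List (List Int)) (x : Int) : Int :=
  ((PySem.List.enumerate A 0).foldl
    (fun (st : Option Int × Int) rp =>
       let m := pvArow rp.2 x
       match st.1 with
       | none => (some m, rp.1)
       | some mo => if mo < m then (some m, rp.1) else st)
    (none, -1)).2

-- ===== PORT B =====
-- P = [0]; for v in row: P.append(P[-1] + v)
def pvPrefix (row : List Int) : List Int :=
  row.foldl (fun P v => P ++ [PySem.List.pyGetD P (-1) 0 + v]) [0]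

-- max(P[i+x] - P[i] for i in range(len(row)-x+1)); the generator is nonempty under Pre_,
-- getD 0 is the total form of Python's max (which raises on an empty sequence)
def pvBest (row : List Int) (x : Int) : Int :=
  let P := pvPrefix row
  ((PySem.List.max? ((PySem.List.pyRange 0 ((row.length : Int) - x + 1) 1).map
      (fun i => PySem.List.pyGetD P (i + x) 0 - PySem.List.pyGetD P i 0)) (fun y => y))).getD 0

def max_sum_row_index_alt (A : List (List Int)) (x : Int) : Int :=
  let bests := A.map (fun row => pvBest row x)
  if bests = [] then -1
  else
    -- bests.index(max(bests)); the index is always found (max? returns a member)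
    match PySem.List.index? bests ((PySem.List.max? bests (fun y => y)).getD 0) with
    | some k => (k : Int)
    | none => -1

-- ===== PRECONDITION & SPEC =====
-- A raises IndexError exactly outside Pre_: when x < 0 or x > len(row) for some row of A
-- (with A = [] no row is ever indexed and A returns -1, so Pre_ is vacuous there).
def Pre_max_sum_row_index (A : List (List Int)) (x : Int) : Prop :=
  ∀ row ∈ A, 0 ≤ x ∧ x ≤ (row.length : Int)
instance (A : List (List Int)) (x : Int) : Decidable (Pre_max_sum_row_index A x) := by
  unfold Pre_max_sum_row_index; infer_instance

def pvWitness_max_sum_row_index : List (List Int) × Int := ([[1, 2, -3], [4, -1]], 2)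

def Spec_max_sum_row_index (A : List (List Int)) (x : Int) (out : Int) : Prop := out = max_sum_row_index_alt A x
instance (A : List (List Int)) (x : Int) (out : Int) : Decidable (Spec_max_sum_row_index A x out) := by unfold Spec_max_sum_row_index; infer_instance

-- ===== CLAIM (what is proved, stated in full; the proofs are below) =====
def Claim_equal_max_sum_row_index : Prop := ∀ (A : List (List Int)) (x : Int), Dom_max_sum_row_index A x → Pre_max_sum_row_index A x → Spec_max_sum_row_index A x (max_sum_row_index A x)

-- ===== LEMMAS AND PROOFS =====

-- mathematical prefix sum, window sum of width k at j, and running max of windows 0..t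
def pvS (row : List Int) (j : Nat) : Int := ((row.take j).sum)
def pvW (row : List Int) (k j : Nat) : Int := pvS row (j + k) - pvS row j
def pvMx (row : List Int) (k : Nat) : Nat → Int
  | 0 => pvW row k 0
  | t + 1 => max (pvMx row k t) (pvW row k (t + 1))

lemma pvS_succ (row : List Int) (j : Nat) (hj : j < row.length) :
    pvS row (j + 1) = pvS row j + row.getD j 0 := by
  rw [pvS, pvS, List.getD_eq_getElem _ _ hj]; exact List.sum_take_succ row j hj

lemma pvPrefix_spec (row : List Int) :
    (pvPrefix row).length = row.length + 1 ∧
    ∀ j ≤ row.length, (pvPrefix row)[j]? = some (pvS row j) := by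
  induction row using List.reverseRecOn with
  | nil => simp [pvPrefix, pvS]
  | append_singleton l v ih =>
    obtain ⟨hlen, hget⟩ := ih
    have hne : pvPrefix l ≠ [] := by
      intro h; rw [h] at hlen; simp at hlen
    have hstep : pvPrefix (l ++ [v]) = pvPrefix l ++ [PySem.List.pyGetD (pvPrefix l) (-1) 0 + v] := by
      simp [pvPrefix, List.foldl_append]
    have hlast : PySem.List.pyGetD (pvPrefix l) (-1) 0 = pvS l l.length := by
      rw [PySem.List.pyGetD_neg_one _ _ hne]
      have h1 := hget l.length (le_refl _)
      rw [List.getLast_eq_getElem, List.getElem?_eq_getElem (by omega)] at *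
      · have h2 : (pvPrefix l).length - 1 = l.length := by omega
        simp_rw [h2]
        exact Option.some.inj h1
    refine ⟨by rw [hstep]; simp [hlen], ?_⟩
    intro j hj
    rw [hstep, hlast]
    rcases Nat.lt_or_ge j (l.length + 1) with h | h
    · rw [List.getElem?_append_left (by omega)]
      have : pvS (l ++ [v]) j = pvS l j := by
        simp [pvS, List.take_append_of_le_length (by omega : j ≤ l.length)]
      rw [this]; exact hget j (by omega)
    · have hj' : j = l.length + 1 := by simp at hj; omega
      subst hj'
      rw [List.getElem?_append_right (by omega)]
      have : pvS (l ++ [v]) (l.length + 1) = l.sum + v := by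
        have : (l ++ [v]).take (l.length + 1) = l ++ [v] := by
          apply List.take_of_length_le; simp
        simp [pvS, this]
      rw [this]
      simp [hlen, pvS, List.take_length]

lemma pvPrefix_getD (row : List Int) (j : Nat) (hj : j ≤ row.length) :
    (pvPrefix row).getD j 0 = pvS row j := by
  have h := (pvPrefix_spec row).2 j hj
  simp [List.getD_eq_getElem?_getD, h]

lemma max?_append_singleton (l : List Int) (m b : Int)
    (h : PySem.List.max? l (fun y => y) = some m) :
    PySem.List.max? (l ++ [b]) (fun y => y) = some (max m b) := by
  cases l with
  | nil => simp [PySem.List.max?] at h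
  | cons a t =>
    rw [PySem.List.max?_id_cons] at h
    rw [List.cons_append, PySem.List.max?_id_cons, List.foldl_append]
    simp [Option.some.inj h]

-- B's generator list has max = the running window max
lemma maxMap (row : List Int) (k : Nat) :
    ∀ t, PySem.List.max? ((List.range (t + 1)).map (fun j => pvW row k j)) (fun y => y)
      = some (pvMx row k t) := by
  intro t
  induction t with
  | zero => simp [PySem.List.max?_id_cons, pvMx]
  | succ t ih =>
    rw [List.range_succ, List.map_append, List.map_singleton]
    rw [max?_append_singleton _ _ _ ih]
    rfl

-- A's initial sum loop computes the prefix sum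
lemma sum0 (row : List Int) : ∀ t, t ≤ row.length →
    (List.range t).foldl (fun c j => c + row.getD j 0) 0 = pvS row t := by
  intro t
  induction t with
  | zero => simp [pvS]
  | succ t ih =>
    intro h
    rw [List.range_succ, List.foldl_append, ih (by omega), List.foldl_cons, List.foldl_nil,
      pvS_succ row t (by omega)]

-- A's incremental loop invariant: running best = pvMx, current sum = last window
lemma loopInv (row : List Int) (k : Nat) (hk : k ≤ row.length) :
    ∀ t, t ≤ row.length - k →
    (List.range t).foldl
      (fun (st : Int × Int) j =>
        (max st.1 (st.2 + row.getD (k + j) 0 - row.getD j 0),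
         st.2 + row.getD (k + j) 0 - row.getD j 0)) (pvS row k, pvS row k)
      = (pvMx row k t, pvW row k t) := by
  intro t
  induction t with
  | zero => intro _; simp [pvMx, pvW, pvS]
  | succ t ih =>
    intro h
    rw [List.range_succ, List.foldl_append, ih (by omega), List.foldl_cons, List.foldl_nil]
    have hW : pvW row k t + row.getD (k + t) 0 - row.getD t 0 = pvW row k (t + 1) := by
      have h1 : pvS row (t + 1 + k) = pvS row (t + k) + row.getD (t + k) 0 := by
        rw [show t + 1 + k = t + k + 1 by omega]
        exact pvS_succ row (t + k) (by omega)
      have h2 : pvS row (t + 1) = pvS row t + row.getD t 0 := pvS_succ row t (by omega)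
      simp only [pvW, h1, h2]
      have : k + t = t + k := by omega
      rw [this]; ring
    simp only [pvMx, pvW] at *
    rw [hW]

lemma pvArow_def (row : List Int) (x : Int) :
    pvArow row x =
    ((PySem.List.pyRange x (row.length : Int) 1).foldl
      (fun (st : Int × Int) i =>
        (max st.1 (st.2 + PySem.List.pyGetD row i 0 - PySem.List.pyGetD row (i - x) 0),
         st.2 + PySem.List.pyGetD row i 0 - PySem.List.pyGetD row (i - x) 0))
      ((PySem.List.pyRange 0 x 1).foldl (fun c i => c + PySem.List.pyGetD row i 0) 0,
       (PySem.List.pyRange 0 x 1).foldl (fun c i => c + PySem.List.pyGetD row i 0) 0)).1 := rfl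

lemma pvBest_def (row : List Int) (x : Int) :
    pvBest row x =
    ((PySem.List.max? ((PySem.List.pyRange 0 ((row.length : Int) - x + 1) 1).map
      (fun i => PySem.List.pyGetD (pvPrefix row) (i + x) 0
        - PySem.List.pyGetD (pvPrefix row) i 0)) (fun y => y))).getD 0 := rfl

lemma pvArow_eq (row : List Int) (k : Nat) (hk : k ≤ row.length) :
    pvArow row (k : Int) = pvMx row k (row.length - k) := by
  rw [pvArow_def]
  have hs0 : (PySem.List.pyRange 0 (k : Int) 1).foldl
      (fun c i => c + PySem.List.pyGetD row i 0) 0 = pvS row k := by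
    rw [PySem.List.pyRange_zero_nat k, List.foldl_map]
    simp only [PySem.List.pyGetD_natCast]
    exact sum0 row k hk
  rw [hs0]
  have hrange : PySem.List.pyRange (k : Int) (row.length : Int) 1
      = (List.range (row.length - k)).map (fun j : Nat => ((k : Int) + (j : Int))) := by
    rw [PySem.List.pyRange_one,
      show (((row.length : Int)) - (k : Int)).toNat = row.length - k by omega]
  rw [hrange, List.foldl_map]
  have hfun : (fun (st : Int × Int) (j : Nat) =>
      (max st.1 (st.2 + PySem.List.pyGetD row ((k : Int) + (j : Int)) 0
        - PySem.List.pyGetD row ((k : Int) + (j : Int) - (k : Int)) 0),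
       st.2 + PySem.List.pyGetD row ((k : Int) + (j : Int)) 0
        - PySem.List.pyGetD row ((k : Int) + (j : Int) - (k : Int)) 0))
      = (fun (st : Int × Int) (j : Nat) =>
      (max st.1 (st.2 + row.getD (k + j) 0 - row.getD j 0),
       st.2 + row.getD (k + j) 0 - row.getD j 0)) := by
    funext st j
    have h2 : (k : Int) + (j : Int) - (k : Int) = ((j : Nat) : Int) := by ring
    have h1 : (k : Int) + (j : Int) = ((k + j : Nat) : Int) := by push_cast; ring
    rw [h2, h1, PySem.List.pyGetD_natCast, PySem.List.pyGetD_natCast]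
  rw [hfun, loopInv row k hk (row.length - k) (le_refl _)]

lemma pvBest_eq (row : List Int) (k : Nat) (hk : k ≤ row.length) :
    pvBest row (k : Int) = pvMx row k (row.length - k) := by
  rw [pvBest_def]
  have hrange : (row.length : Int) - (k : Int) + 1 = ((row.length - k + 1 : Nat) : Int) := by
    omega
  rw [hrange, PySem.List.pyRange_zero_nat]
  rw [List.map_map]
  have hmap : (List.range (row.length - k + 1)).map
      ((fun i => PySem.List.pyGetD (pvPrefix row) (i + (k : Int)) 0
        - PySem.List.pyGetD (pvPrefix row) i 0) ∘ (fun j : Nat => (j : Int)))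
      = (List.range (row.length - k + 1)).map (fun j => pvW row k j) := by
    apply List.map_congr_left
    intro j hj
    rw [List.mem_range] at hj
    simp only [Function.comp]
    have h1 : (j : Int) + (k : Int) = ((j + k : Nat) : Int) := by push_cast; ring
    rw [h1, PySem.List.pyGetD_natCast, PySem.List.pyGetD_natCast]
    rw [pvPrefix_getD row (j + k) (by omega), pvPrefix_getD row j (by omega)]
    rfl
  rw [hmap, maxMap row k (row.length - k)]
  rfl

lemma rowEq (row : List Int) (k : Nat) (hk : k ≤ row.length) :
    pvArow row (k : Int) = pvBest row (k : Int) := by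
  rw [pvArow_eq row k hk, pvBest_eq row k hk]

-- the outer accumulator step over (index, best) pairs, shared shape of both outer passes
def pvStep (st : Option Int × Int) (bp : Int × Int) : Option Int × Int :=
  match st.1 with
  | none => (some bp.2, bp.1)
  | some mo => if mo < bp.2 then (some bp.2, bp.1) else st

lemma mem_snd_enumerate (l : List (List Int)) (p : Int × List Int) :
    ∀ s, p ∈ PySem.List.enumerate l s → p.2 ∈ l := by
  induction l with
  | nil => intro s h; simp [PySem.List.enumerate_nil] at h
  | cons a t ih =>
    intro s h
    rw [PySem.List.enumerate_cons] at h
    rcases List.mem_cons.mp h with h | h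
    · subst h; simp
    · exact List.mem_cons_of_mem _ (ih (s + 1) h)

lemma enumerate_append_singleton (l : List Int) (b : Int) :
    ∀ s, PySem.List.enumerate (l ++ [b]) s = PySem.List.enumerate l s ++ [(s + l.length, b)] := by
  induction l with
  | nil => intro s; simp [PySem.List.enumerate_cons, PySem.List.enumerate_nil]
  | cons a t ih =>
    intro s
    rw [List.cons_append, PySem.List.enumerate_cons, ih (s + 1), PySem.List.enumerate_cons]
    simp; ring

-- A's outer loop computes (max of the bests, first index attaining it)
lemma foldA_spec (bs : List Int) (hne : bs ≠ []) :
    ∃ m j, PySem.List.max? bs (fun y => y) = some m ∧ PySem.List.index? bs m = some j ∧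
      (PySem.List.enumerate bs 0).foldl pvStep (none, -1) = (some m, (j : Int)) := by
  induction bs using List.reverseRecOn with
  | nil => exact absurd rfl hne
  | append_singleton l b ih =>
    cases l with
    | nil =>
      refine ⟨b, 0, ?_, ?_, ?_⟩
      · simp [PySem.List.max?_id_cons]
      · exact PySem.List.index?_cons_self b []
      · simp [PySem.List.enumerate_cons, PySem.List.enumerate_nil, pvStep]
    | cons a t =>
      obtain ⟨m, j, hmax, hidx, hfold⟩ := ih (by simp)
      rw [enumerate_append_singleton _ b 0, List.foldl_append, hfold]
      rw [max?_append_singleton _ m b hmax]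
      by_cases hlt : m < b
      · refine ⟨max m b, (a :: t).length, by rfl, ?_, ?_⟩
        · rw [max_eq_right (le_of_lt hlt)]
          apply PySem.List.index?_append_singleton_self
          intro hb
          exact absurd (PySem.List.max?_isMax hmax b hb) (by omega)
        · simp only [List.foldl_cons, List.foldl_nil, pvStep]
          rw [max_eq_right (le_of_lt hlt)]
          simp [hlt]
      · refine ⟨max m b, j, by rfl, ?_, ?_⟩
        · rw [max_eq_left (by omega)]
          rw [PySem.List.index?_append_of_mem _ (PySem.List.max?_mem hmax)]
          exact hidx
        · simp only [List.foldl_cons, List.foldl_nil, pvStep]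
          rw [max_eq_left (by omega)]
          simp [hlt]

lemma enumerate_map (l : List (List Int)) (g : List Int → Int) :
    ∀ s, PySem.List.enumerate (l.map g) s
      = (PySem.List.enumerate l s).map (fun p => (p.1, g p.2)) := by
  induction l with
  | nil => intro s; simp [PySem.List.enumerate_nil]
  | cons a t ih =>
    intro s
    simp [PySem.List.enumerate_cons, ih (s + 1)]

lemma mainEq (A : List (List Int)) (x : Int)
    (hpre : Pre_max_sum_row_index A x) :
    max_sum_row_index A x = max_sum_row_index_alt A x := by
  cases A with
  | nil => rfl
  | cons r t =>
    have hA : ∀ row ∈ (r :: t), pvArow row x = pvBest row x := by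
      intro row hrow
      obtain ⟨h1, h2⟩ := hpre row hrow
      have : x = ((x.toNat : Nat) : Int) := by omega
      rw [this]
      exact rowEq row x.toNat (by omega)
    have step1 : max_sum_row_index (r :: t) x
        = ((PySem.List.enumerate (r :: t) 0).foldl
            (fun st rp => pvStep st (rp.1, pvBest rp.2 x)) (none, -1)).2 := by
      unfold max_sum_row_index
      congr 1
      apply PySem.List.foldl_congr_mem
      intro acc p hp
      rw [show pvArow p.2 x = pvBest p.2 x from hA p.2 (mem_snd_enumerate _ p 0 hp)]
      rfl
    have step2 : ((PySem.List.enumerate (r :: t) 0).foldl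
            (fun st rp => pvStep st (rp.1, pvBest rp.2 x)) (none, -1)).2
        = ((PySem.List.enumerate ((r :: t).map (fun row => pvBest row x)) 0).foldl
            pvStep (none, -1)).2 := by
      rw [enumerate_map, List.foldl_map]
    obtain ⟨m, j, hmax, hidx, hfold⟩ :=
      foldA_spec ((r :: t).map (fun row => pvBest row x)) (by simp)
    rw [step1, step2, hfold]
    unfold max_sum_row_index_alt
    simp only [hmax, hidx, Option.getD_some]
    simp

-- ===== VERDICT (by name: the statement is the Claim_ definition above) =====
theorem max_sum_row_index_spec : Claim_equal_max_sum_row_index := by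
  intro A x _ hpre
  unfold Spec_max_sum_row_index
  exact mainEq A x hpre
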